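-- pv_equiv track=rewrite | github.com/shank54/Leetcode | Find Permutation.py | findPermutation
-- ===== SOURCE A (Python) =====
-- def findPermutation(s):
--     """
--     :type s: str
--     :rtype: List[int]
--     """
--     res = [1]*(len(s)+1)
--     i = 1
--     j = 0
--     flag = 1
--     while i<=len(s):
--         res[i] = i+1
--         j = i
--         if s[i-1] == "D":
--             while i<=len(s) and s[i-1] == "D":
--                 i += 1
--             tmp = j-1
--             for k in range(i,j-1,-1):
--                 res[tmp] = k
--                 tmp += 1
--         else:
--             i += 1
--     return res
-- ===== SOURCE B (Python) =====
-- def findPermutation(s):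
--     res = []
--     stack = []
--     for i in range(len(s) + 1):
--         stack.append(i + 1)
--         if i == len(s) or s[i] != 'D':
--             while stack:
--                 res.append(stack.pop())
--     return res
-- ===== Notes on version B (the rewrite author's own statement) =====
-- stated objective: idiomatic
-- what changed: B replaces A's in-place array mutation (pre-filled list, nested while loops over each descending run, index-juggling reverse write) with the canonical single forward pass that pushes i+1 on an explicit stack and flushes the stack into the output at the end of every descending run and at the end of the string.
import Mathlib
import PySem

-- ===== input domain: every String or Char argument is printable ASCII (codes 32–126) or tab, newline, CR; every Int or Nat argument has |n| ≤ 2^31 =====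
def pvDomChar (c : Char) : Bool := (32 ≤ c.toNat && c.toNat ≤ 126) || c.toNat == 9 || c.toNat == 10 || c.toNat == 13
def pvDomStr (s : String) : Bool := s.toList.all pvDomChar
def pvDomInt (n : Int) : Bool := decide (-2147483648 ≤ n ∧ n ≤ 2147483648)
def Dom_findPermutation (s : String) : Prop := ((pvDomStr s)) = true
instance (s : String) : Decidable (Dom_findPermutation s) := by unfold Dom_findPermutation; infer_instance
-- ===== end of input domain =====

-- B rebuilds the permutation with a single forward pass and an explicit stack, flushed at the
-- end of each descending run (the canonical LeetCode-484 stack solution), instead of A's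
-- in-place rewriting of a pre-filled array; objective: idiomatic.

-- ===== PORT A =====
-- inner 'while i<=len(s) and s[i-1]=="D": i += 1' of A (returns the final i).
-- s[i-1] is read via List.getD: exact here because the guard i ≤ cs.length (with 1 ≤ i
-- at every call site) keeps the index in range, so Python raises nothing.
def advA (cs : List Char) (i : Nat) : Nat :=
  if h : i ≤ cs.length ∧ cs.getD (i - 1) ' ' = 'D' then advA cs (i + 1) else i
termination_by cs.length + 1 - i
decreasing_by omega

theorem advA_ge (cs : List Char) (i : Nat) : i ≤ advA cs i := by
  rw [advA]
  split
  · have := advA_ge cs (i + 1); omega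
  · exact le_refl i
termination_by cs.length + 1 - i
decreasing_by omega

theorem advA_lt (cs : List Char) (i : Nat) (h1 : i ≤ cs.length)
    (h2 : cs.getD (i - 1) ' ' = 'D') : i < advA cs i := by
  rw [advA, dif_pos ⟨h1, h2⟩]
  have := advA_ge cs (i + 1); omega

-- outer 'while i<=len(s):' of A; res is the array being mutated in place; the Python
-- locals j = i and tmp = j-1 are substituted, the dead 'flag' is dropped; the
-- 'for k in range(i, j-1, -1): res[tmp] = k; tmp += 1' becomes the foldl over pyRange.
def loopA (cs : List Char) (res : List Int) (i : Nat) : List Int :=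
  if h : i ≤ cs.length then
    if hD : cs.getD (i - 1) ' ' = 'D' then
      loopA cs
        (((PySem.List.pyRange (advA cs i : Int) ((i : Int) - 1) (-1)).foldl
            (fun (st : List Int × Nat) k => (st.1.set st.2 k, st.2 + 1))
            (res.set i ((i : Int) + 1), i - 1)).1)
        (advA cs i)
    else loopA cs (res.set i ((i : Int) + 1)) (i + 1)
  else res
termination_by cs.length + 1 - i
decreasing_by
  · have := advA_lt cs i h hD; omega
  · omega

def findPermutation (s : String) : List Int :=
  loopA s.toList (List.replicate (s.toList.length + 1) 1) 1

-- ===== PORT B =====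
-- 'while stack: res.append(stack.pop())' of B (pop = take from the back).
def flushB (stack res : List Int) : List Int :=
  if h : stack = [] then res
  else flushB stack.dropLast (res ++ [stack.getLast h])
termination_by stack.length
decreasing_by simp [List.length_dropLast]; exact List.length_pos_iff.mpr h

-- 'for i in range(len(s)+1): stack.append(i+1); if i == len(s) or s[i] != "D": flush'
-- state = (res, stack); s[i] via getD, in range because i ≠ len(s) on that branch.
def findPermutation_alt (s : String) : List Int :=
  ((List.range (s.toList.length + 1)).foldl
    (fun (st : List Int × List Int) i =>
      if i = s.toList.length ∨ s.toList.getD i ' ' ≠ 'D' then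
        (flushB (st.2 ++ [(i : Int) + 1]) st.1, ([] : List Int))
      else (st.1, st.2 ++ [(i : Int) + 1]))
    ([], [])).1

-- ===== PRECONDITION & SPEC =====
def Spec_findPermutation (s : String) (out : List Int) : Prop := out = findPermutation_alt s
instance (s : String) (out : List Int) : Decidable (Spec_findPermutation s out) := by unfold Spec_findPermutation; infer_instance

-- ===== CLAIM (what is proved, stated in full; the proofs are below) =====
def Claim_equal_findPermutation : Prop := ∀ (s : String), Dom_findPermutation s → Spec_findPermutation s (findPermutation s)

-- ===== LEMMAS AND PROOFS =====

-- [hi, hi-1, ..., lo] as a list of Ints (empty if hi < lo); definitionally the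
-- pyRange appearing in loopA's descending write.
def desc (hi lo : Nat) : List Int := PySem.List.pyRange (hi : Int) ((lo : Int) - 1) (-1)

theorem desc_split (hi lo : Nat) (h : lo ≤ hi) :
    desc hi lo = desc hi (lo + 1) ++ [(lo : Int)] := by
  unfold desc
  rw [PySem.List.pyRange_neg_one_eq_reverse, PySem.List.pyRange_neg_one_eq_reverse]
  have h1 : ((lo : Int) - 1) + 1 = (lo : Int) := by ring
  have h2 : ((lo + 1 : Nat) : Int) - 1 + 1 = (lo : Int) + 1 := by push_cast; ring
  rw [h1, h2, PySem.List.pyRange_one_cons (by exact_mod_cast Nat.lt_succ_of_le h)]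
  simp

theorem desc_len (hi lo : Nat) : (desc hi lo).length = hi + 1 - lo := by
  unfold desc
  rw [PySem.List.length_pyRange_neg_one]
  omega

theorem desc_nil (hi lo : Nat) (h : hi < lo) : desc hi lo = [] := by
  unfold desc
  rw [PySem.List.pyRange_neg_one_eq_nil]
  omega

-- closed form of the 'for k in range(i, j-1, -1)' write loop: it overwrites the
-- segment of res starting at t with ks.
theorem foldl_set (ks : List Int) (res : List Int) (t : Nat)
    (h : t + ks.length ≤ res.length) :
    (ks.foldl (fun (st : List Int × Nat) k => (st.1.set st.2 k, st.2 + 1)) (res, t))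
      = (res.take t ++ ks ++ res.drop (t + ks.length), t + ks.length) := by
  induction ks generalizing res t with
  | nil => simp
  | cons k ks ih =>
    simp only [List.foldl_cons, List.length_cons] at *
    have hlt : t < res.length := by omega
    rw [ih (res.set t k) (t + 1) (by simp; omega)]
    rw [List.set_eq_take_cons_drop k hlt]
    have h1 : (res.take t ++ k :: res.drop (t + 1)).take (t + 1) = res.take t ++ [k] := by
      rw [List.take_append]
      simp [List.length_take, Nat.min_eq_left (le_of_lt hlt)]
    have h2 : ∀ m, (res.take t ++ k :: res.drop (t + 1)).drop (t + 1 + m) = res.drop (t + 1 + m) := by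
      intro m
      rw [List.drop_append]
      rw [List.drop_eq_nil_of_le (by simp only [List.length_take]; omega)]
      have he : t + 1 + m - (res.take t).length = m + 1 := by
        simp only [List.length_take]; omega
      rw [he]
      simp only [List.drop_succ_cons, List.drop_drop, List.nil_append]
    rw [h1, h2]
    simp only [Prod.mk.injEq]
    constructor
    · have he : t + 1 + ks.length = t + (ks.length + 1) := by omega
      rw [he]; simp
    · omega

-- pure description of A's outer loop from index i, v = the tentative value already
-- written at result position i-1.
def gA (cs : List Char) (i : Nat) (v : Int) : List Int :=
  if h : i ≤ cs.length then
    if hD : cs.getD (i - 1) ' ' = 'D' then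
      desc (advA cs i) (i + 1) ++ gA cs (advA cs i) (i : Int)
    else v :: gA cs (i + 1) ((i : Int) + 1)
  else [v]
termination_by cs.length + 1 - i
decreasing_by
  · have := advA_lt cs i h hD; omega
  · omega

-- pure description of B's fold from index a with pending stack st.
def gB (cs : List Char) (a : Nat) (st : List Int) : List Int :=
  if a ≤ cs.length then
    if a = cs.length ∨ cs.getD a ' ' ≠ 'D' then
      (st ++ [(a : Int) + 1]).reverse ++ gB cs (a + 1) []
    else gB cs (a + 1) (st ++ [(a : Int) + 1])
  else []
termination_by cs.length + 1 - a
decreasing_by all_goals omega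

theorem advA_le (cs : List Char) (i : Nat) (h : i ≤ cs.length + 1) :
    advA cs i ≤ cs.length + 1 := by
  rw [advA]
  split
  · next hg => exact advA_le cs (i + 1) (by omega)
  · exact h
termination_by cs.length + 1 - i
decreasing_by next hg => omega

theorem advA_stop (cs : List Char) (i : Nat) :
    ¬ (advA cs i ≤ cs.length ∧ cs.getD (advA cs i - 1) ' ' = 'D') := by
  rw [advA]
  split
  · exact advA_stop cs (i + 1)
  · next h => exact h
termination_by cs.length + 1 - i
decreasing_by next hg => omega

theorem flushB_eq (stack : List Int) : ∀ res, flushB stack res = res ++ stack.reverse := by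
  induction stack using List.reverseRecOn with
  | nil => intro res; rw [flushB]; simp
  | append_singleton q x ih =>
    intro res
    rw [flushB, dif_neg (by simp)]
    simp only [List.dropLast_concat, List.getLast_append]
    rw [ih]
    simp

-- invariant of A's outer loop: positions 0..i-2 (= P) are final, position i-1 holds v,
-- the rest is still the initial filler.
theorem loopA_inv (cs : List Char) (i : Nat) (P rest : List Int) (v : Int)
    (h1 : 1 ≤ i) (hi : i ≤ cs.length + 1) (hP : P.length = i - 1)
    (hr : rest.length = cs.length + 1 - i) :
    loopA cs (P ++ v :: rest) i = P ++ gA cs i v := by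
  rw [loopA, gA]
  by_cases hle : i ≤ cs.length
  · rw [dif_pos hle, dif_pos hle]
    cases rest with
    | nil => exfalso; simp at hr; omega
    | cons r0 rest' =>
    have hset : (P ++ v :: r0 :: rest').set i ((i : Int) + 1)
        = P ++ v :: ((i : Int) + 1) :: rest' := by
      rw [List.set_append_right _ _ (by omega)]
      have : i - P.length = 1 := by omega
      rw [this]
      rfl
    by_cases hD : cs.getD (i - 1) ' ' = 'D'
    · rw [dif_pos hD, dif_pos hD]
      have hlt := advA_lt cs i hle hD
      have hub := advA_le cs i (by omega)
      set i2 := advA cs i with hi2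
      -- the written run is desc i2 i
      have hdesc : PySem.List.pyRange (i2 : Int) ((i : Int) - 1) (-1) = desc i2 i := rfl
      have hlen : (desc i2 i).length = i2 - i + 1 := by rw [desc_len]; omega
      rw [hset, hdesc]
      have hr' : rest'.length = cs.length - i := by simp at hr; omega
      rw [foldl_set _ _ _ (by simp [hlen]; omega)]
      simp only
      rw [hlen]
      have htake : (P ++ v :: ((i : Int) + 1) :: rest').take (i - 1) = P := by
        rw [List.take_append]
        simp [hP]
      have hdrop : (P ++ v :: ((i : Int) + 1) :: rest').drop (i - 1 + (i2 - i + 1))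
          = rest'.drop (i2 - i - 1) := by
        have : P ++ v :: ((i : Int) + 1) :: rest' = (P ++ [v, (i : Int) + 1]) ++ rest' := by simp
        rw [this, List.drop_append]
        have hl : (P ++ [v, (i : Int) + 1]).length = i + 1 := by simp [hP]; omega
        rw [List.drop_eq_nil_of_le (by simp [hl]; omega)]
        rw [hl]
        simp only [List.nil_append]
        congr 1
        omega
      rw [htake, hdrop, desc_split i2 i (by omega)]
      have : (P ++ (desc i2 (i + 1) ++ [(i : Int)]) ++ rest'.drop (i2 - i - 1))
          = (P ++ desc i2 (i + 1)) ++ (i : Int) :: rest'.drop (i2 - i - 1) := by simp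
      rw [this]
      rw [loopA_inv cs i2 (P ++ desc i2 (i + 1)) (rest'.drop (i2 - i - 1)) (i : Int)
        (by omega) hub (by simp [hP, desc_len]; omega) (by simp [hr']; omega)]
      simp
    · rw [dif_neg hD, dif_neg hD, hset]
      have : P ++ v :: ((i : Int) + 1) :: rest' = (P ++ [v]) ++ ((i : Int) + 1) :: rest' := by simp
      rw [this]
      rw [loopA_inv cs (i + 1) (P ++ [v]) rest' ((i : Int) + 1)
        (by omega) (by omega) (by simp [hP]; omega) (by simp at hr ⊢; omega)]
      simp
  · rw [dif_neg hle, dif_neg hle]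
    have : i = cs.length + 1 := by omega
    have hr0 : rest = [] := by rw [List.eq_nil_iff_length_eq_zero]; omega
    simp [hr0]
termination_by cs.length + 1 - i
decreasing_by
  all_goals first
  | (have := advA_lt cs i hle hD; omega)
  | omega

-- one full descending run of B: from index a with pending stack st, B next emits
-- advA(a+1) .. a+1 followed by the reversed stack.
theorem gB_run (cs : List Char) (a : Nat) (st : List Int) (ha : a ≤ cs.length) :
    gB cs a st = desc (advA cs (a + 1)) (a + 1) ++ st.reverse ++ gB cs (advA cs (a + 1)) [] := by
  rw [gB, if_pos ha]
  by_cases hf : a = cs.length ∨ cs.getD a ' ' ≠ 'D'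
  · rw [if_pos hf]
    have hadv : advA cs (a + 1) = a + 1 := by
      rw [advA, dif_neg]
      simp only [Nat.add_sub_cancel]
      intro hc
      rcases hf with hf | hf
      · omega
      · exact hf hc.2
    rw [hadv, desc_split (a + 1) (a + 1) le_rfl, desc_nil (a + 1) (a + 2) (by omega)]
    simp
  · rw [if_neg hf]
    push_neg at hf
    have hD : cs.getD a ' ' = 'D' := hf.2
    have ha' : a + 1 ≤ cs.length := by omega
    have hadv : advA cs (a + 1) = advA cs (a + 2) := by
      rw [advA, dif_pos ⟨ha', by simpa using hD⟩]
    rw [gB_run cs (a + 1) (st ++ [(a : Int) + 1]) ha']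
    rw [hadv, desc_split (advA cs (a + 2)) (a + 1)
      (by have := advA_ge cs (a + 2); omega)]
    push_cast
    simp
termination_by cs.length - a
decreasing_by omega

-- the heart of the equivalence: A's tail from 1-based index a+1 (fresh run, pending
-- value a+1) equals B's tail from 0-based index a with an empty stack.
theorem gA_eq_gB (cs : List Char) (a : Nat) (ha : a ≤ cs.length) :
    gA cs (a + 1) ((a : Int) + 1) = gB cs a [] := by
  rw [gA]
  by_cases hle : a + 1 ≤ cs.length
  · rw [dif_pos hle]
    simp only [Nat.add_sub_cancel]
    by_cases hD : cs.getD a ' ' = 'D'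
    · rw [dif_pos hD]
      have hlt := advA_lt cs (a + 1) hle (by simpa using hD)
      have hub := advA_le cs (a + 1) (by omega)
      set i2 := advA cs (a + 1) with hi2
      have hstop := advA_stop cs (a + 1)
      rw [gB_run cs a [] ha, ← hi2]
      rw [gA]
      by_cases h2 : i2 ≤ cs.length
      · rw [dif_pos h2]
        have hnd : ¬ cs.getD (i2 - 1) ' ' = 'D' := fun hc => hstop ⟨h2, hc⟩
        rw [dif_neg hnd]
        rw [gA_eq_gB cs i2 h2]
        rw [desc_split i2 (a + 1) (by omega)]
        push_cast
        simp
      · rw [dif_neg h2]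
        have hi2e : i2 = cs.length + 1 := by omega
        rw [desc_split i2 (a + 1) (by omega)]
        have : gB cs i2 [] = [] := by rw [gB, if_neg (by omega)]
        rw [this]
        push_cast
        simp
    · rw [dif_neg hD]
      conv_rhs => rw [gB]
      rw [if_pos ha, if_pos (Or.inr hD), gA_eq_gB cs (a + 1) hle]
      simp
  · rw [dif_neg hle]
    have hae : a = cs.length := by omega
    rw [gB, if_pos ha, if_pos (Or.inl hae)]
    have : gB cs (a + 1) [] = [] := by rw [gB, if_neg (by omega)]
    rw [this]
    simp
termination_by cs.length - a
decreasing_by all_goals omega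

-- B's fold over range' a m, decomposed through gB.
theorem foldB (cs : List Char) (m : Nat) : ∀ (a : Nat) (res st : List Int),
    a + m = cs.length + 1 →
    ((List.range' a m).foldl
      (fun (st : List Int × List Int) i =>
        if i = cs.length ∨ cs.getD i ' ' ≠ 'D' then
          (flushB (st.2 ++ [(i : Int) + 1]) st.1, ([] : List Int))
        else (st.1, st.2 ++ [(i : Int) + 1]))
      (res, st)).1 = res ++ gB cs a st := by
  induction m with
  | zero =>
    intro a res st h
    rw [gB, if_neg (by omega)]
    simp
  | succ m ih =>
    intro a res st h
    rw [List.range'_succ, List.foldl_cons]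
    by_cases hf : a = cs.length ∨ cs.getD a ' ' ≠ 'D'
    · simp only [if_pos hf]
      rw [ih (a + 1) _ _ (by omega), flushB_eq]
      conv_rhs => rw [gB]
      rw [if_pos (show a ≤ cs.length by omega), if_pos hf]
      simp
    · simp only [if_neg hf]
      rw [ih (a + 1) _ _ (by omega)]
      conv_rhs => rw [gB]
      rw [if_pos (show a ≤ cs.length by omega), if_neg hf]

-- ===== VERDICT (by name: the statement is the Claim_ definition above) =====
theorem findPermutation_spec : Claim_equal_findPermutation := by
  intro s _
  unfold Spec_findPermutation findPermutation findPermutation_alt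
  set cs := s.toList with hcs
  have hA : loopA cs (List.replicate (cs.length + 1) 1) 1 = gA cs 1 1 := by
    have : List.replicate (cs.length + 1) (1 : Int)
        = [] ++ (1 : Int) :: List.replicate cs.length 1 := by simp [List.replicate_succ]
    rw [this]
    have := loopA_inv cs 1 [] (List.replicate cs.length 1) 1
      (le_refl 1) (by omega) (by simp) (by simp)
    simpa using this
  rw [hA]
  rw [List.range_eq_range']
  rw [foldB cs (cs.length + 1) 0 [] [] (by omega)]
  have := gA_eq_gB cs 0 (by omega)
  simpa using this
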